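-- pv_equiv track=rewrite | github.com/Viktorharmens/bookcompass | backend/ingest_data.py | style_text
-- ===== SOURCE A (Python) =====
-- TONE_KEYWORDS = [
--     "dark", "melancholic", "humorous", "satirical", "lyrical", "poetic",
--     "gritty", "hopeful", "suspenseful", "whimsical", "philosophical",
--     "minimalist", "gothic", "surreal", "intimate", "epic", "sparse",
--     "ironic", "tragic", "romantic", "thriller", "mystery", "horror",
-- ]
--
-- def style_text(description: str, subjects: str) -> str:
--     desc_lower = description.lower()
--     found = [kw for kw in TONE_KEYWORDS if kw in desc_lower]
--     subj_lower = subjects.lower() if subjects else ""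
--     found += [kw for kw in TONE_KEYWORDS if kw in subj_lower and kw not in found]
--     if found:
--         return "Writing style: " + ", ".join(found[:8])
--     return "Writing style based on: " + " ".join(description.split()[:80])
-- ===== SOURCE B (Python) =====
-- TONE_KEYWORDS = [
--     "dark", "melancholic", "humorous", "satirical", "lyrical", "poetic",
--     "gritty", "hopeful", "suspenseful", "whimsical", "philosophical",
--     "minimalist", "gothic", "surreal", "intimate", "epic", "sparse",
--     "ironic", "tragic", "romantic", "thriller", "mystery", "horror",
-- ]
--
-- _RANK = {kw: i for i, kw in enumerate(TONE_KEYWORDS)}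
--
--
-- def _hits(text):
--     # Text-driven matching: walk the text once and collect every keyword
--     # that starts at some position, as an (orderless) set.
--     hits = set()
--     for i in range(len(text)):
--         for kw in TONE_KEYWORDS:
--             if text.startswith(kw, i):
--                 hits.add(kw)
--     return hits
--
--
-- def style_text(description: str, subjects: str) -> str:
--     desc_lower = description.lower()
--     subj_lower = subjects.lower() if subjects else ""
--     desc_hits = _hits(desc_lower)
--     subj_hits = _hits(subj_lower) - desc_hits
--     key = lambda kw: _RANK.get(kw, -1)
--     found = sorted(desc_hits, key=key) + sorted(subj_hits, key=key)
--     if found: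
--         return "Writing style: " + ", ".join(found[:8])
--     return "Writing style based on: " + " ".join(description.split()[:80])
-- ===== Notes on version B (the rewrite author's own statement) =====
-- stated objective: alternative
-- what changed: Instead of A's keyword-driven substring scans ('kw in text' per keyword, with a list-membership dedup), B walks each text position by position collecting into sets every keyword that starts there, dedups description/subject matches by set difference, and recovers the keyword-list order by sorting each hit set by keyword rank.
import Mathlib
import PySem

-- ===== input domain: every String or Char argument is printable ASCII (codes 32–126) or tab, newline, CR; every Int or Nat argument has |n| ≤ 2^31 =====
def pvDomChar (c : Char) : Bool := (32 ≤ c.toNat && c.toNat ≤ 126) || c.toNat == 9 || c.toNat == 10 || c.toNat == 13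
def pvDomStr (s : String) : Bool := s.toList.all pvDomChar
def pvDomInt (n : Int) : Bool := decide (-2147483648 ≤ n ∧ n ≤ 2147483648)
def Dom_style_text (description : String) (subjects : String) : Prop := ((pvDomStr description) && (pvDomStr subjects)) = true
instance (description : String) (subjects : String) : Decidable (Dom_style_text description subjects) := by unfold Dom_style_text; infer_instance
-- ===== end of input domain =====

-- B replaces A's keyword-driven substring scans by a text-driven scan: it walks each text
-- position by position collecting the keywords that start there into sets, dedups by set
-- difference, and recovers keyword order by sorting by rank (alternative decomposition).

def TONE_KEYWORDS : List String :=
  ["dark", "melancholic", "humorous", "satirical", "lyrical", "poetic",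
   "gritty", "hopeful", "suspenseful", "whimsical", "philosophical",
   "minimalist", "gothic", "surreal", "intimate", "epic", "sparse",
   "ironic", "tragic", "romantic", "thriller", "mystery", "horror"]

-- ===== PORT A =====
def style_text (description : String) (subjects : String) : String :=
  let desc_lower := PySem.Str.lower description
  let found := TONE_KEYWORDS.filter (fun kw => PySem.Str.isIn kw desc_lower)
  let subj_lower := if subjects ≠ "" then PySem.Str.lower subjects else ""
  let found := found ++ TONE_KEYWORDS.filter
      (fun kw => PySem.Str.isIn kw subj_lower && !found.contains kw)
  if found ≠ [] then
    "Writing style: " ++ PySem.Str.join ", " (found.take 8)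
  else
    "Writing style based on: " ++ PySem.Str.join " " ((PySem.Str.split₀ description).take 80)

-- ===== PORT B =====
-- _RANK = {kw: i for i, kw in enumerate(TONE_KEYWORDS)}
def RANK : PySem.Dict String Int :=
  PySem.Dict.ofList ((PySem.List.enumerate TONE_KEYWORDS 0).map (fun p => (p.2, p.1)))

-- _hits(text): for i in range(len(text)): for kw in TONE_KEYWORDS: if text.startswith(kw, i): hits.add(kw)
-- Python's text.startswith(kw, i) with 0 ≤ i is exactly PySem.Chars.startswith (text.drop i) kw (hand-ported, exact on that domain).
def hitsSet (text : List Char) : PySem.Set String :=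
  (List.range text.length).foldl
    (fun acc i => TONE_KEYWORDS.foldl
      (fun (acc2 : PySem.Set String) kw =>
        if PySem.Chars.startswith (text.drop i) kw.toList then PySem.Set.add acc2 kw else acc2)
      acc)
    PySem.Set.empty

def style_text_alt (description : String) (subjects : String) : String :=
  let desc_lower := PySem.Str.lower description
  let subj_lower := if subjects ≠ "" then PySem.Str.lower subjects else ""
  let desc_hits := hitsSet desc_lower.toList
  let subj_hits := PySem.Set.diff (hitsSet subj_lower.toList) desc_hits
  let key := fun kw => PySem.Dict.getD RANK kw (-1)
  let found := PySem.List.sorted desc_hits key ++ PySem.List.sorted subj_hits key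
  if found ≠ [] then
    "Writing style: " ++ PySem.Str.join ", " (found.take 8)
  else
    "Writing style based on: " ++ PySem.Str.join " " ((PySem.Str.split₀ description).take 80)

-- ===== PRECONDITION & SPEC =====
def Spec_style_text (description : String) (subjects : String) (out : String) : Prop := out = style_text_alt description subjects
instance (description : String) (subjects : String) (out : String) : Decidable (Spec_style_text description subjects out) := by unfold Spec_style_text; infer_instance

-- ===== CLAIM (what is proved, stated in full; the proofs are below) =====
def Claim_equal_style_text : Prop := ∀ (description : String) (subjects : String), Dom_style_text description subjects → Spec_style_text description subjects (style_text description subjects)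

-- ===== LEMMAS AND PROOFS =====

-- Every tone keyword is nonempty, TONE_KEYWORDS has no duplicates, and RANK orders it strictly.
theorem tone_kw_ne_nil : ∀ kw ∈ TONE_KEYWORDS, kw.toList ≠ [] := by decide

theorem tone_rank_strict :
    TONE_KEYWORDS.Pairwise (fun a b => PySem.Dict.getD RANK a (-1) < PySem.Dict.getD RANK b (-1)) := by
  decide

-- The inner keyword loop of _hits is a Set.update with the keywords matching at position i.
theorem hits_inner (text : List Char) (i : Nat) (acc : PySem.Set String) :
    TONE_KEYWORDS.foldl
      (fun (acc2 : PySem.Set String) kw =>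
        if PySem.Chars.startswith (text.drop i) kw.toList then PySem.Set.add acc2 kw else acc2) acc
    = PySem.Set.update acc (TONE_KEYWORDS.filter (fun kw => PySem.Chars.startswith (text.drop i) kw.toList)) := by
  rw [PySem.List.foldl_if_eq_foldl_filter]; rfl

theorem hits_nodup (text : List Char) : (hitsSet text).Nodup := by
  unfold hitsSet
  generalize List.range text.length = idxs
  induction idxs using List.reverseRecOn with
  | nil => simp [PySem.Set.empty]
  | append_singleton t i ih =>
    rw [List.foldl_append, List.foldl_cons, List.foldl_nil, hits_inner]
    exact PySem.Set.nodup_update _ _ ih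

theorem mem_hitsSet (text : List Char) (y : String) :
    y ∈ hitsSet text ↔ y ∈ TONE_KEYWORDS ∧ ∃ i < text.length, y.toList <+: text.drop i := by
  unfold hitsSet
  have h : ∀ idxs : List Nat, ∀ acc : PySem.Set String,
      y ∈ idxs.foldl
        (fun acc i => TONE_KEYWORDS.foldl
          (fun (acc2 : PySem.Set String) kw =>
            if PySem.Chars.startswith (text.drop i) kw.toList then PySem.Set.add acc2 kw else acc2) acc) acc
      ↔ y ∈ acc ∨ (y ∈ TONE_KEYWORDS ∧ ∃ i ∈ idxs, y.toList <+: text.drop i) := by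
    intro idxs
    induction idxs with
    | nil => simp
    | cons i t ih =>
      intro acc
      rw [List.foldl_cons, hits_inner, ih]
      simp only [PySem.Set.mem_update, List.mem_filter, List.mem_cons]
      constructor
      · rintro (((hy | ⟨hm, hs⟩) ) | ⟨hm, j, hj, hp⟩)
        · exact Or.inl hy
        · exact Or.inr ⟨hm, i, Or.inl rfl, (PySem.Chars.startswith_iff _ _).mp hs⟩
        · exact Or.inr ⟨hm, j, Or.inr hj, hp⟩
      · rintro (hy | ⟨hm, j, (rfl | hj), hp⟩)
        · exact Or.inl (Or.inl hy)
        · exact Or.inl (Or.inr ⟨hm, (PySem.Chars.startswith_iff _ _).mpr hp⟩)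
        · exact Or.inr ⟨hm, j, hj, hp⟩
  rw [h]
  simp only [PySem.Set.empty]
  constructor
  · rintro (h' | ⟨hm, i, hi, hp⟩)
    · simp at h'
    · exact ⟨hm, i, by simpa using List.mem_range.mp hi, hp⟩
  · rintro ⟨hm, i, hi, hp⟩
    exact Or.inr ⟨hm, i, List.mem_range.mpr hi, hp⟩

-- Membership in a hit set is exactly 'kw ∈ TONE_KEYWORDS and kw in text' (keywords are nonempty).
theorem mem_hitsSet_isIn (s : String) (y : String) :
    y ∈ hitsSet s.toList ↔ y ∈ TONE_KEYWORDS ∧ PySem.Str.isIn y s = true := by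
  rw [mem_hitsSet, PySem.Str.isIn_iff_infix]
  constructor
  · rintro ⟨hm, i, _, hp⟩
    exact ⟨hm, (PySem.Chars.exists_prefix_drop_iff_isIn _ _).mp ⟨i, hp⟩ |>
      (fun h => (PySem.Chars.isIn_iff_infix _ _).mp h)⟩
  · rintro ⟨hm, hin⟩
    refine ⟨hm, ?_⟩
    obtain ⟨i, hp⟩ := (PySem.Chars.exists_prefix_drop_iff_isIn y.toList s.toList).mpr
      ((PySem.Chars.isIn_iff_infix _ _).mpr hin)
    refine ⟨i, ?_, hp⟩
    by_contra hle
    push Not at hle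
    have : s.toList.drop i = [] := List.drop_eq_nil_of_le hle
    rw [this] at hp
    exact tone_kw_ne_nil y hm (List.prefix_nil.mp hp)

-- Sorting a nodup hit set by rank reproduces the TONE_KEYWORDS.filter it corresponds to.
theorem sorted_eq_filter (S : PySem.Set String) (f : String → Bool)
    (hnd : S.Nodup)
    (hmem : ∀ y, y ∈ S ↔ y ∈ TONE_KEYWORDS.filter f) :
    PySem.List.sorted S (fun kw => PySem.Dict.getD RANK kw (-1)) = TONE_KEYWORDS.filter f := by
  apply PySem.List.sorted_eq_of_perm_of_pairwise_lt
  · exact (List.perm_ext_iff_of_nodup (List.Nodup.filter _ (by decide)) hnd).mpr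
      (fun y => (hmem y).symm)
  · exact List.Pairwise.sublist List.filter_sublist tone_rank_strict

-- A's second comprehension's "kw not in found" is, on members of TONE_KEYWORDS, just "kw not in description".
theorem contains_filter_self (p : String → Bool) (kws : List String) (kw : String)
    (h : kw ∈ kws) : (kws.filter p).contains kw = p kw := by
  by_cases hp : p kw <;> simp [List.mem_filter, h, hp]

theorem second_filter (dl sl : String) :
    TONE_KEYWORDS.filter (fun kw => PySem.Str.isIn kw sl
        && !(TONE_KEYWORDS.filter (fun kw => PySem.Str.isIn kw dl)).contains kw)
      = TONE_KEYWORDS.filter (fun kw => !PySem.Str.isIn kw dl && PySem.Str.isIn kw sl) := by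
  apply List.filter_congr
  intro kw hkw
  rw [contains_filter_self _ _ _ hkw]
  cases PySem.Str.isIn kw dl <;> cases PySem.Str.isIn kw sl <;> rfl

-- ===== VERDICT (by name: the statement is the Claim_ definition above) =====
set_option maxHeartbeats 1000000 in
theorem style_text_spec : Claim_equal_style_text := by
  intro description subjects _
  unfold Spec_style_text style_text style_text_alt
  have h1 : PySem.List.sorted (hitsSet (PySem.Str.lower description).toList)
      (fun kw => PySem.Dict.getD RANK kw (-1))
      = TONE_KEYWORDS.filter (fun kw => PySem.Str.isIn kw (PySem.Str.lower description)) :=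
    sorted_eq_filter _ _ (hits_nodup _)
      (fun y => by rw [mem_hitsSet_isIn]; simp [List.mem_filter])
  have h2 : PySem.List.sorted
      (PySem.Set.diff (hitsSet (if subjects ≠ "" then PySem.Str.lower subjects else "").toList)
        (hitsSet (PySem.Str.lower description).toList))
      (fun kw => PySem.Dict.getD RANK kw (-1))
      = TONE_KEYWORDS.filter (fun kw => !PySem.Str.isIn kw (PySem.Str.lower description)
          && PySem.Str.isIn kw (if subjects ≠ "" then PySem.Str.lower subjects else "")) :=
    sorted_eq_filter _ _ (PySem.Set.nodup_diff _ _ (hits_nodup _))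
      (fun y => by
        rw [PySem.Set.mem_diff, mem_hitsSet_isIn, mem_hitsSet_isIn]
        simp only [List.mem_filter, Bool.and_eq_true, not_and, Bool.not_eq_true, Bool.not_eq_true']
        tauto)
  simp only [h1, h2, second_filter]
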